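-- pv_equiv track=rewrite | github.com/Patxi91/CodeWars_Cloud | 6kyu-One down-Patxi.py | one_down
-- ===== SOURCE A (Python) =====
-- def one_down(txt):
--     if not isinstance(txt, str):
--         return "Input is not a string"
--
--     result = []
--     for char in txt:
--         if char.isalpha():
--             # Shift the letter one position to the left in the alphabet
--             if char.isupper():
--                 result.append(chr((ord(char) - 65 - 1) % 26 + 65))
--             else:
--                 result.append(chr((ord(char) - 97 - 1) % 26 + 97))
--         else:
--             result.append(char)
--
--     return ''.join(result)
-- ===== SOURCE B (Python) =====
-- # B: one precomputed translation table (str.maketrans) applied via str.translate — idiomatic, no per-character loop/branching.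
-- _U = "ABCDEFGHIJKLMNOPQRSTUVWXYZ"
-- _L = _U.lower()
-- _TABLE = str.maketrans(_U + _L, (_U[-1] + _U[:-1]) + (_L[-1] + _L[:-1]))
--
-- def one_down(txt):
--     if not isinstance(txt, str):
--         return "Input is not a string"
--     return txt.translate(_TABLE)
-- ===== Notes on version B (the rewrite author's own statement) =====
-- stated objective: faster
-- what changed: Replaces the per-character isalpha/isupper branching and modular ord/chr arithmetic with a translation table built once (str.maketrans of the two alphabets rotated one back) applied via str.translate.
import Mathlib
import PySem

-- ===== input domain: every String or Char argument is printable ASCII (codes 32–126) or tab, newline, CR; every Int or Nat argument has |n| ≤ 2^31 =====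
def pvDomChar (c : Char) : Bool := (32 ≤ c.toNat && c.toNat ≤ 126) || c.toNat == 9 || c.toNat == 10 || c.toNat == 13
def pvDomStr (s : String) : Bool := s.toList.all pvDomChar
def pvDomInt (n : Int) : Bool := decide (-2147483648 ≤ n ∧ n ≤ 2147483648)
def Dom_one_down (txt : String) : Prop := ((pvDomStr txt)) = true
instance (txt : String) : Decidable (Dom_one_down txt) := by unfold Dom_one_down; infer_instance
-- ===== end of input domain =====

-- B replaces A's per-character branching/modular arithmetic with one precomputed
-- translation table applied to every character (idiomatic str.translate).

-- ===== PORT A =====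
-- per-character body of A's loop
def pvStepA (c : Char) : Char :=
  if PySem.Chars.isalpha c then
    if PySem.Chars.isupper c then
      Char.ofNat ((PySem.Int.mod ((c.toNat : Int) - 65 - 1) 26 + 65).toNat)
    else
      Char.ofNat ((PySem.Int.mod ((c.toNat : Int) - 97 - 1) 26 + 97).toNat)
  else c

def one_down (txt : String) : String :=
  -- result = []; for char in txt: result.append(...); return ''.join(result)
  String.mk (txt.toList.foldl (fun result ch => result ++ [pvStepA ch]) [])

-- ===== PORT B =====
def pvUpper : List Char := "ABCDEFGHIJKLMNOPQRSTUVWXYZ".toList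
def pvLowerB : List Char := PySem.Chars.lower pvUpper
-- s[-1] + s[:-1]
def pvRot1 (l : List Char) : List Char :=
  PySem.List.slice l (some (-1)) none ++ PySem.List.slice l none (some (-1))
-- str.maketrans(U+L, rot(U)+rot(L))
def pvTable : PySem.Dict Char Char :=
  PySem.Dict.ofList (List.zip (pvUpper ++ pvLowerB) (pvRot1 pvUpper ++ pvRot1 pvLowerB))

def one_down_alt (txt : String) : String :=
  -- txt.translate(_TABLE): each char replaced by its table image, identity if absent
  String.mk (txt.toList.map (fun c => pvTable.getD c c))

-- ===== PRECONDITION & SPEC =====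
def Spec_one_down (txt : String) (out : String) : Prop := out = one_down_alt txt
instance (txt : String) (out : String) : Decidable (Spec_one_down txt out) := by unfold Spec_one_down; infer_instance

-- ===== CLAIM (what is proved, stated in full; the proofs are below) =====
def Claim_equal_one_down : Prop := ∀ (txt : String), Dom_one_down txt → Spec_one_down txt (one_down txt)

-- ===== LEMMAS AND PROOFS =====

-- the two per-character maps agree on all codes < 127 (checked by computation)
set_option maxRecDepth 4000 in
theorem pvStep_agree_all :
    (List.range 127).all
      (fun n => pvStepA (Char.ofNat n) == pvTable.getD (Char.ofNat n) (Char.ofNat n)) = true := by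
  decide

theorem pvStep_agree (c : Char) (h : pvDomChar c = true) :
    pvStepA c = pvTable.getD c c := by
  have hlt : c.toNat < 127 := by
    simp [pvDomChar] at h
    omega
  have hmem : c.toNat ∈ List.range 127 := List.mem_range.mpr hlt
  have := List.all_eq_true.mp pvStep_agree_all _ hmem
  have h2 := eq_of_beq this
  rwa [Char.ofNat_toNat] at h2

theorem pvFoldl_append (l : List Char) (acc : List Char) :
    l.foldl (fun result ch => result ++ [pvStepA ch]) acc = acc ++ l.map pvStepA := by
  induction l generalizing acc with
  | nil => simp
  | cons x xs ih => simp [List.foldl, ih]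

-- ===== VERDICT (by name: the statement is the Claim_ definition above) =====
set_option maxRecDepth 4000 in
theorem one_down_spec : Claim_equal_one_down := by
  intro txt hdom
  unfold Spec_one_down one_down one_down_alt
  rw [pvFoldl_append, List.nil_append]
  congr 1
  apply List.map_congr_left
  intro c hc
  exact pvStep_agree c (List.all_eq_true.mp hdom c hc)
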